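-- pv_equiv track=rewrite | github.com/UCSF-DataSci/final-project-rebekahx23 | data_quality_agent/local_lab.py | _find_temporal_pair
-- ===== SOURCE A (Python) =====
-- from typing import Any
--
-- def _is_text_column(column: dict[str, Any]) -> bool:
--     col_type = str(column.get("type", "")).upper()
--     return ("CHAR" in col_type) or ("TEXT" in col_type) or (col_type == "")
--
-- def _is_numeric_column(column: dict[str, Any]) -> bool:
--     col_type = str(column.get("type", "")).upper()
--     return ("INT" in col_type) or ("REAL" in col_type) or ("NUM" in col_type) or ("DEC" in col_type)
--
-- def _is_temporal_column(column: dict[str, Any]) -> bool: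
--     name = str(column.get("name", "")).lower()
--     col_type = str(column.get("type", "")).upper()
--     name_hint = any(token in name for token in ("date", "time", "dt", "ts", "admission", "discharge"))
--     type_hint = ("DATE" in col_type) or ("TIME" in col_type)
--     return name_hint or type_hint
--
-- def _find_column_by_name_patterns(
--     columns: list[dict[str, Any]],
--     *,
--     patterns: tuple[str, ...],
--     require_text: bool = False,
--     require_numeric: bool = False,
--     exclude: set[str] | None = None,
-- ) -> str | None:
--     blocked = exclude or set()
--     for col in columns:
--         name = str(col["name"])
--         lower = name.lower()
--         padded = f"_{lower}_"
--         if name in blocked: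
--             continue
--         if not any(f"_{pattern}_" in padded for pattern in patterns):
--             continue
--         if require_text and not _is_text_column(col):
--             continue
--         if require_numeric and not _is_numeric_column(col):
--             continue
--         return name
--     return None
--
-- def _find_temporal_pair(columns: list[dict[str, Any]]) -> tuple[str | None, str | None]:
--     start_patterns = ("admission", "start", "from", "begin", "checkin")
--     end_patterns = ("discharge", "end", "to", "stop", "checkout")
--     start_col = _find_column_by_name_patterns(columns, patterns=start_patterns)
--     end_col = _find_column_by_name_patterns(
--         columns,
--         patterns=end_patterns,
--         exclude={start_col} if start_col else None,
--     )
--     if start_col and end_col: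
--         return start_col, end_col
--
--     temporal_cols = [col["name"] for col in columns if _is_temporal_column(col)]
--     if len(temporal_cols) >= 2:
--         return temporal_cols[0], temporal_cols[1]
--     return None, None
-- ===== SOURCE B (Python) =====
-- def _find_temporal_pair(columns):
--     start_patterns = ("admission", "start", "from", "begin", "checkin")
--     end_patterns = ("discharge", "end", "to", "stop", "checkout")
--     temporal_tokens = ("date", "time", "dt", "ts", "admission", "discharge")
--     s = None          # first column whose name matches a start pattern
--     e1 = None         # first column whose name matches an end pattern
--     e2 = None         # first end match whose name differs from e1's
--     temps = []        # first two temporal column names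
--     for col in columns:
--         name = str(col["name"])
--         lower = name.lower()
--         padded = f"_{lower}_"
--         if s is None and any(f"_{p}_" in padded for p in start_patterns):
--             s = name
--         if any(f"_{p}_" in padded for p in end_patterns):
--             if e1 is None:
--                 e1 = name
--             elif e2 is None and name != e1:
--                 e2 = name
--         if len(temps) < 2:
--             col_type = str(col.get("type", "")).upper()
--             if any(t in lower for t in temporal_tokens) or "DATE" in col_type or "TIME" in col_type:
--                 temps.append(name)
--     end = e1 if (s is None or e1 != s) else e2
--     if s is not None and end is not None:
--         return s, end
--     if len(temps) == 2:
--         return temps[0], temps[1]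
--     return None, None
-- ===== Notes on version B (the rewrite author's own statement) =====
-- stated objective: alternative
-- what changed: Replaces A's three separate scans (start-pattern scan, end-pattern scan with exclusion, temporal filter) by one single pass that maintains the first start match, the first two distinctly-named end matches and the first two temporal names, combining them afterwards; the generic pattern helper and its unused flags are inlined.
-- outside the precondition, e.g. on _find_temporal_pair([{'name': 'start'}, {'name': 'end'}, {}]): A returns ('start', 'end'), B raises KeyError
import Mathlib
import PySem

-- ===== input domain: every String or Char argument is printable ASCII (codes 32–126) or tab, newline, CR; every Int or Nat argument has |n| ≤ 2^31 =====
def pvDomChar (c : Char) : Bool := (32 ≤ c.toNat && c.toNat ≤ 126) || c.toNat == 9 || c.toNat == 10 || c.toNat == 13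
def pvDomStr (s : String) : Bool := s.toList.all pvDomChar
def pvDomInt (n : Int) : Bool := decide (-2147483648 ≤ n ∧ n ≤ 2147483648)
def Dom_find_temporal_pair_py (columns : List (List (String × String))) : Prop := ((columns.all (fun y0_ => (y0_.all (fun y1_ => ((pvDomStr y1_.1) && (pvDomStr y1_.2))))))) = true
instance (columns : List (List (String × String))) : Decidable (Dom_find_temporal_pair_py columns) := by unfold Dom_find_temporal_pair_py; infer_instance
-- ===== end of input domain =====

-- B replaces A's three scans over the columns by one single pass; return values agree on Pre_ (every column carries a "name" key).


-- ===== PORT A =====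
-- 'any(f"_{pattern}_" in padded for pattern in patterns)' on the char level (f-string concat is list append)
def pvMatchesA (name : String) (patterns : List String) : Bool :=
  let padded := '_' :: PySem.Chars.lower name.toList ++ ['_']
  patterns.any (fun p => PySem.Chars.isIn ('_' :: p.toList ++ ['_']) padded)

-- _find_column_by_name_patterns (require_text/require_numeric are never passed True by A, so the dead branches are dropped)
def pvFindByPatternsA (columns : List (List (String × String))) (patterns : List String)
    (blocked : List String) : Option String :=
  match columns with
  | [] => none
  | col :: rest =>
    match PySem.Dict.get? (⟨col⟩ : PySem.Dict String String) "name" with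
    | none => none   -- Python raises KeyError here; such inputs are outside Pre_
    | some name =>
      if blocked.contains name then pvFindByPatternsA rest patterns blocked
      else if pvMatchesA name patterns then some name
      else pvFindByPatternsA rest patterns blocked

def pvIsTemporalA (col : List (String × String)) : Bool :=
  let name := PySem.Chars.lower (PySem.Dict.getD (⟨col⟩ : PySem.Dict String String) "name" "").toList
  let ty := PySem.Chars.upper (PySem.Dict.getD (⟨col⟩ : PySem.Dict String String) "type" "").toList
  (["date", "time", "dt", "ts", "admission", "discharge"].any (fun t => PySem.Chars.isIn t.toList name))
    || PySem.Chars.isIn "DATE".toList ty || PySem.Chars.isIn "TIME".toList ty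

-- Python truthiness of an Optional[str]
def pvTruthy (o : Option String) : Bool := match o with | none => false | some s => !(s == "")

def find_temporal_pair_py (columns : List (List (String × String))) : Option String × Option String :=
  let startPats := ["admission", "start", "from", "begin", "checkin"]
  let endPats := ["discharge", "end", "to", "stop", "checkout"]
  let start_col := pvFindByPatternsA columns startPats []
  let end_col := pvFindByPatternsA columns endPats
    (match start_col with | some s => if s == "" then [] else [s] | none => [])
  if pvTruthy start_col && pvTruthy end_col then (start_col, end_col)
  else
    -- [col["name"] for col in columns if _is_temporal_column(col)]; the key is present under Pre_
    let temporal := (columns.filter pvIsTemporalA).map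
      (fun col => PySem.Dict.getD (⟨col⟩ : PySem.Dict String String) "name" "")
    if 2 ≤ temporal.length then (PySem.List.pyGet? temporal 0, PySem.List.pyGet? temporal 1)
    else (none, none)

-- ===== PORT B =====
-- single-pass state: (first start match, first end match, first end match named differently, first two temporal names)
def pvStepB (st : Option String × Option String × Option String × List String)
    (col : List (String × String)) : Option String × Option String × Option String × List String :=
  match PySem.Dict.get? (⟨col⟩ : PySem.Dict String String) "name" with
  | none => st   -- Python raises KeyError here; such inputs are outside Pre_
  | some name =>
    match st with
    | (s, e1, e2, t) =>
      let low := PySem.Chars.lower name.toList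
      let padded := '_' :: low ++ ['_']
      let s' := if s.isNone && (["admission", "start", "from", "begin", "checkin"].any
                  (fun p => PySem.Chars.isIn ('_' :: p.toList ++ ['_']) padded)) then some name else s
      let (e1', e2') :=
        if ["discharge", "end", "to", "stop", "checkout"].any
            (fun p => PySem.Chars.isIn ('_' :: p.toList ++ ['_']) padded) then
          match e1 with
          | none => (some name, e2)
          | some n => if e2.isNone && !(name == n) then (e1, some name) else (e1, e2)
        else (e1, e2)
      let t' :=
        if t.length < 2 &&
            ((["date", "time", "dt", "ts", "admission", "discharge"].any
                (fun tok => PySem.Chars.isIn tok.toList low))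
              || PySem.Chars.isIn "DATE".toList
                  (PySem.Chars.upper (PySem.Dict.getD (⟨col⟩ : PySem.Dict String String) "type" "").toList)
              || PySem.Chars.isIn "TIME".toList
                  (PySem.Chars.upper (PySem.Dict.getD (⟨col⟩ : PySem.Dict String String) "type" "").toList))
        then t ++ [name] else t
      (s', e1', e2', t')

def find_temporal_pair_py_alt (columns : List (List (String × String))) : Option String × Option String :=
  match columns.foldl pvStepB (none, none, none, []) with
  | (s, e1, e2, t) =>
    let endc := if s.isNone || !(e1 == s) then e1 else e2
    if s.isSome && endc.isSome then (s, endc)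
    else match t with
      | [t0, t1] => (some t0, some t1)
      | _ => (none, none)

-- ===== PRECONDITION & SPEC =====
-- Pre_ excludes column lists in which some dict lacks a "name" key: Python A raises KeyError on them (unless an
-- earlier start/end match pair lets it return before reaching the bad column), while B's single pass always reads
-- every column's name and raises there.
def Pre_find_temporal_pair_py (columns : List (List (String × String))) : Prop :=
  ∀ col ∈ columns, (PySem.Dict.get? (⟨col⟩ : PySem.Dict String String) "name").isSome = true
instance (columns : List (List (String × String))) : Decidable (Pre_find_temporal_pair_py columns) := by
  unfold Pre_find_temporal_pair_py; infer_instance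

def pvWitness_find_temporal_pair_py : (List (List (String × String))) :=
  [[("name", "start_date"), ("type", "TEXT")], [("name", "end_date")]]

def Spec_find_temporal_pair_py (columns : List (List (String × String))) (out : Option String × Option String) : Prop := out = find_temporal_pair_py_alt columns
instance (columns : List (List (String × String))) (out : Option String × Option String) : Decidable (Spec_find_temporal_pair_py columns out) := by unfold Spec_find_temporal_pair_py; infer_instance

-- ===== CLAIM (what is proved, stated in full; the proofs are below) =====
def Claim_equal_find_temporal_pair_py : Prop := ∀ (columns : List (List (String × String))), Dom_find_temporal_pair_py columns → Pre_find_temporal_pair_py columns → Spec_find_temporal_pair_py columns (find_temporal_pair_py columns)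


-- ===== LEMMAS AND PROOFS =====

-- pattern lists, named for the proofs (definitionally the literals in the ports)
def pvSP : List String := ["admission", "start", "from", "begin", "checkin"]
def pvEP : List String := ["discharge", "end", "to", "stop", "checkout"]

theorem pvFindByPatternsA_cons (col : List (String × String)) (name : String)
    (hget : PySem.Dict.get? (⟨col⟩ : PySem.Dict String String) "name" = some name)
    (rest : List (List (String × String))) (P blocked : List String) :
    pvFindByPatternsA (col :: rest) P blocked =
      (if blocked.contains name then pvFindByPatternsA rest P blocked
       else if pvMatchesA name P then some name
       else pvFindByPatternsA rest P blocked) := by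
  simp [pvFindByPatternsA, hget]

-- one step of B, spelled with A's predicates (valid when the column has a "name" key)
theorem pvStepB_eq (col : List (String × String)) (name : String)
    (hget : PySem.Dict.get? (⟨col⟩ : PySem.Dict String String) "name" = some name)
    (s e1 e2 : Option String) (t : List String) :
    pvStepB (s, e1, e2, t) col =
      ( if s.isNone && pvMatchesA name pvSP then some name else s,
        (if pvMatchesA name pvEP then (match e1 with | none => some name | some _ => e1) else e1),
        (if pvMatchesA name pvEP then
            (match e1 with
             | none => e2
             | some n => if e2.isNone && !(name == n) then some name else e2)
          else e2),
        if t.length < 2 && pvIsTemporalA col then t ++ [name] else t ) := by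
  have hgd : PySem.Dict.getD (⟨col⟩ : PySem.Dict String String) "name" "" = name := by
    simp [PySem.Dict.getD_eq_get?_getD, hget]
  have hS : (["admission", "start", "from", "begin", "checkin"].any
      (fun p => PySem.Chars.isIn ('_' :: p.toList ++ ['_'])
        ('_' :: PySem.Chars.lower name.toList ++ ['_']))) = pvMatchesA name pvSP := rfl
  have hE : (["discharge", "end", "to", "stop", "checkout"].any
      (fun p => PySem.Chars.isIn ('_' :: p.toList ++ ['_'])
        ('_' :: PySem.Chars.lower name.toList ++ ['_']))) = pvMatchesA name pvEP := rfl
  have hT : ((["date", "time", "dt", "ts", "admission", "discharge"].any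
        (fun tok => PySem.Chars.isIn tok.toList (PySem.Chars.lower name.toList)))
      || PySem.Chars.isIn "DATE".toList
          (PySem.Chars.upper (PySem.Dict.getD (⟨col⟩ : PySem.Dict String String) "type" "").toList)
      || PySem.Chars.isIn "TIME".toList
          (PySem.Chars.upper (PySem.Dict.getD (⟨col⟩ : PySem.Dict String String) "type" "").toList))
      = pvIsTemporalA col := by
    simp only [pvIsTemporalA, hgd]
  simp only [pvStepB, hget, hS, hE, hT]
  cases hb : pvMatchesA name pvEP <;> cases e1 <;> simp <;> split <;> simp

theorem pvFind_matches (cols : List (List (String × String))) (P blocked : List String)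
    (n : String) (h : pvFindByPatternsA cols P blocked = some n) : pvMatchesA n P = true := by
  induction cols with
  | nil => simp [pvFindByPatternsA] at h
  | cons col rest ih =>
    cases hget : PySem.Dict.get? (⟨col⟩ : PySem.Dict String String) "name" with
    | none => rw [pvFindByPatternsA, hget] at h; exact absurd h (by simp)
    | some name =>
      rw [pvFindByPatternsA_cons col name hget] at h
      by_cases hb : blocked.contains name
      · rw [if_pos hb] at h; exact ih h
      · rw [if_neg hb] at h
        by_cases hm : pvMatchesA name P
        · rw [if_pos hm] at h; cases h; exact hm
        · rw [if_neg hm] at h; exact ih h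

-- blocking never creates a match
theorem pvFind_mono_none (cols : List (List (String × String))) (P blocked : List String)
    (h : pvFindByPatternsA cols P [] = none) : pvFindByPatternsA cols P blocked = none := by
  induction cols with
  | nil => simp [pvFindByPatternsA]
  | cons col rest ih =>
    cases hget : PySem.Dict.get? (⟨col⟩ : PySem.Dict String String) "name" with
    | none => rw [pvFindByPatternsA, hget]
    | some name =>
      rw [pvFindByPatternsA_cons col name hget] at h
      rw [pvFindByPatternsA_cons col name hget]
      simp only [List.contains_nil, Bool.false_eq_true, if_false] at h
      by_cases hm : pvMatchesA name P
      · rw [if_pos hm] at h; exact absurd h (by simp)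
      · rw [if_neg hm] at h
        by_cases hb : blocked.contains name
        · rw [if_pos hb]; exact ih h
        · rw [if_neg hb, if_neg hm]; exact ih h

-- blocking a name other than the first match keeps the first match
theorem pvFind_first_not_blocked (cols : List (List (String × String))) (P : List String)
    (n m : String) (h : pvFindByPatternsA cols P [] = some n) (hnm : n ≠ m) :
    pvFindByPatternsA cols P [m] = some n := by
  induction cols with
  | nil => simp [pvFindByPatternsA] at h
  | cons col rest ih =>
    cases hget : PySem.Dict.get? (⟨col⟩ : PySem.Dict String String) "name" with
    | none => rw [pvFindByPatternsA, hget] at h; exact absurd h (by simp)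
    | some name =>
      rw [pvFindByPatternsA_cons col name hget] at h
      rw [pvFindByPatternsA_cons col name hget]
      simp only [List.contains_nil, Bool.false_eq_true, if_false] at h
      by_cases hm : pvMatchesA name P
      · rw [if_pos hm] at h
        cases h
        rw [if_neg (by simp [hnm]), if_pos hm]
      · rw [if_neg hm] at h
        by_cases hb : [m].contains name
        · rw [if_pos hb]; exact ih h
        · rw [if_neg hb, if_neg hm]; exact ih h

-- a returned name is nonempty (the empty name matches no pattern of either list)
theorem pvFind_ne_empty (cols : List (List (String × String))) (P blocked : List String)
    (n : String) (h : pvFindByPatternsA cols P blocked = some n)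
    (hP : pvMatchesA "" P = false) : (n == "") = false := by
  have hm := pvFind_matches cols P blocked n h
  by_contra hc
  simp only [Bool.not_eq_false, beq_iff_eq] at hc
  rw [hc, hP] at hm
  exact absurd hm (by simp)

-- components of B's single-pass state, characterised by A's scans (each component evolves independently)
theorem pvFoldB_s (cols : List (List (String × String)))
    (hpre : ∀ col ∈ cols, (PySem.Dict.get? (⟨col⟩ : PySem.Dict String String) "name").isSome = true)
    (s e1 e2 : Option String) (t : List String) :
    (cols.foldl pvStepB (s, e1, e2, t)).1 =
      (match s with | some v => some v | none => pvFindByPatternsA cols pvSP []) := by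
  induction cols generalizing s e1 e2 t with
  | nil => cases s <;> simp [pvFindByPatternsA]
  | cons col rest ih =>
    obtain ⟨name, hget⟩ := Option.isSome_iff_exists.mp (hpre col (List.mem_cons_self))
    have hpre' : ∀ c ∈ rest, (PySem.Dict.get? (⟨c⟩ : PySem.Dict String String) "name").isSome = true :=
      fun c hc => hpre c (List.mem_cons_of_mem _ hc)
    rw [List.foldl_cons, pvStepB_eq col name hget,
      pvFindByPatternsA_cons col name hget rest pvSP []]
    simp only [List.contains_nil, Bool.false_eq_true, if_false]
    cases s with
    | some v => rw [ih hpre']; simp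
    | none =>
      by_cases hmS : pvMatchesA name pvSP
      · rw [ih hpre']; simp [hmS]
      · rw [ih hpre']; simp [hmS]

theorem pvFoldB_e1 (cols : List (List (String × String)))
    (hpre : ∀ col ∈ cols, (PySem.Dict.get? (⟨col⟩ : PySem.Dict String String) "name").isSome = true)
    (s e1 e2 : Option String) (t : List String) :
    (cols.foldl pvStepB (s, e1, e2, t)).2.1 =
      (match e1 with | some v => some v | none => pvFindByPatternsA cols pvEP []) := by
  induction cols generalizing s e1 e2 t with
  | nil => cases e1 <;> simp [pvFindByPatternsA]
  | cons col rest ih =>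
    obtain ⟨name, hget⟩ := Option.isSome_iff_exists.mp (hpre col (List.mem_cons_self))
    have hpre' : ∀ c ∈ rest, (PySem.Dict.get? (⟨c⟩ : PySem.Dict String String) "name").isSome = true :=
      fun c hc => hpre c (List.mem_cons_of_mem _ hc)
    rw [List.foldl_cons, pvStepB_eq col name hget,
      pvFindByPatternsA_cons col name hget rest pvEP []]
    simp only [List.contains_nil, Bool.false_eq_true, if_false]
    cases e1 with
    | some v => rw [ih hpre']; cases hmE : pvMatchesA name pvEP <;> simp [hmE]
    | none =>
      by_cases hmE : pvMatchesA name pvEP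
      · rw [ih hpre']; simp [hmE]
      · rw [ih hpre']; simp [hmE]

theorem pvFoldB_e2 (cols : List (List (String × String)))
    (hpre : ∀ col ∈ cols, (PySem.Dict.get? (⟨col⟩ : PySem.Dict String String) "name").isSome = true)
    (s e1 e2 : Option String) (t : List String) (hse : e1 = none → e2 = none) :
    (cols.foldl pvStepB (s, e1, e2, t)).2.2.1 =
      (match e1, e2 with
       | some n, none => pvFindByPatternsA cols pvEP [n]
       | some _, some v => some v
       | none, _ =>
         (match pvFindByPatternsA cols pvEP [] with
          | some n => pvFindByPatternsA cols pvEP [n]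
          | none => none)) := by
  induction cols generalizing s e1 e2 t with
  | nil =>
    cases e1 with
    | some n => cases e2 <;> simp [pvFindByPatternsA]
    | none => have h0 := hse rfl; subst h0; simp [pvFindByPatternsA]
  | cons col rest ih =>
    obtain ⟨name, hget⟩ := Option.isSome_iff_exists.mp (hpre col (List.mem_cons_self))
    have hpre' : ∀ c ∈ rest, (PySem.Dict.get? (⟨c⟩ : PySem.Dict String String) "name").isSome = true :=
      fun c hc => hpre c (List.mem_cons_of_mem _ hc)
    rw [List.foldl_cons, pvStepB_eq col name hget]
    cases e1 with
    | none =>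
      have h0 := hse rfl; subst h0
      by_cases hmE : pvMatchesA name pvEP
      · simp only [hmE, if_true]
        rw [ih hpre' _ (some name) none _ (by simp)]
        simp only [pvFindByPatternsA_cons col name hget rest pvEP, hmE,
          List.contains_nil, Bool.false_eq_true, if_false, if_true]
        simp [List.contains_cons]
      · simp only [hmE, Bool.false_eq_true, if_false]
        rw [ih hpre' _ none none _ (fun _ => rfl)]
        simp only [pvFindByPatternsA_cons col name hget rest pvEP,
          List.contains_nil, Bool.false_eq_true, if_false, hmE]
        cases hF : pvFindByPatternsA rest pvEP [] with
        | none => simp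
        | some n => simp
    | some n1 =>
      cases e2 with
      | some v =>
        by_cases hmE : pvMatchesA name pvEP <;>
          simp only [hmE, if_true, Bool.false_eq_true, if_false, Option.isNone_some, Bool.false_and] <;>
          rw [ih hpre' _ (some n1) (some v) _ (by simp)]
      | none =>
        by_cases hmE : pvMatchesA name pvEP
        · simp only [hmE, if_true, Option.isNone_none, Bool.true_and]
          by_cases hnn : (name == n1)
          · simp only [hnn, Bool.not_true, Bool.and_false, Bool.false_eq_true, if_false]
            rw [ih hpre' _ (some n1) none _ (by simp)]
            simp only [pvFindByPatternsA_cons col name hget rest pvEP]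
            rw [if_pos (by simp_all)]
          · simp only [hnn, Bool.not_false, Bool.and_true, if_true]
            rw [ih hpre' _ (some n1) (some name) _ (by simp)]
            simp only [pvFindByPatternsA_cons col name hget rest pvEP]
            rw [if_neg (by simp_all), if_pos hmE]
        · simp only [hmE, Bool.false_eq_true, if_false]
          rw [ih hpre' _ (some n1) none _ (by simp)]
          simp only [pvFindByPatternsA_cons col name hget rest pvEP]
          by_cases hb : ([n1].contains name)
          · rw [if_pos hb]
          · rw [if_neg hb, if_neg hmE]
theorem pvFoldB_t (cols : List (List (String × String)))
    (hpre : ∀ col ∈ cols, (PySem.Dict.get? (⟨col⟩ : PySem.Dict String String) "name").isSome = true)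
    (s e1 e2 : Option String) (t : List String) (ht : t.length ≤ 2) :
    (cols.foldl pvStepB (s, e1, e2, t)).2.2.2 =
      t ++ ((cols.filter pvIsTemporalA).map
            (fun col => PySem.Dict.getD (⟨col⟩ : PySem.Dict String String) "name" "")).take (2 - t.length) := by
  induction cols generalizing s e1 e2 t with
  | nil => simp
  | cons col rest ih =>
    obtain ⟨name, hget⟩ := Option.isSome_iff_exists.mp (hpre col (List.mem_cons_self))
    have hpre' : ∀ c ∈ rest, (PySem.Dict.get? (⟨c⟩ : PySem.Dict String String) "name").isSome = true :=
      fun c hc => hpre c (List.mem_cons_of_mem _ hc)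
    have hgd : PySem.Dict.getD (⟨col⟩ : PySem.Dict String String) "name" "" = name := by
      simp [PySem.Dict.getD_eq_get?_getD, hget]
    rw [List.foldl_cons, pvStepB_eq col name hget, List.filter_cons]
    by_cases htc : pvIsTemporalA col
    · rw [if_pos htc]
      by_cases hlt : t.length < 2
      · have hstep : (if t.length < 2 && pvIsTemporalA col then t ++ [name] else t) = t ++ [name] := by
          simp [hlt, htc]
        rw [hstep, ih hpre' _ _ _ _ (by simp only [List.length_append, List.length_cons, List.length_nil]; omega)]
        have h2 : 2 - t.length = (1 - t.length) + 1 := by omega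
        have h3 : 2 - (t ++ [name]).length = 1 - t.length := by
          simp only [List.length_append, List.length_cons, List.length_nil]; omega
        simp only [h2, h3, List.map_cons, hgd, List.take_succ_cons, List.append_assoc,
          List.singleton_append]
      · have hstep : (if t.length < 2 && pvIsTemporalA col then t ++ [name] else t) = t := by
          simp [hlt]
        rw [hstep, ih hpre' _ _ _ _ ht]
        have h0 : 2 - t.length = 0 := by omega
        simp [h0]
    · have hstep : (if t.length < 2 && pvIsTemporalA col then t ++ [name] else t) = t := by
        simp [htc]
      rw [if_neg htc, hstep, ih hpre' _ _ _ _ ht]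
theorem pvTemporal_agree (T : List String) :
    (if 2 ≤ T.length then (PySem.List.pyGet? T 0, PySem.List.pyGet? T 1)
     else ((none : Option String), (none : Option String))) =
      (match T.take 2 with
       | [t0, t1] => (some t0, some t1)
       | _ => ((none : Option String), none)) := by
  match T with
  | [] => simp
  | [a] => simp
  | a :: b :: rest =>
    have hnn : ((0:Int) ≤ (rest.length:Int) + 1) := by positivity
    have h1 : PySem.List.pyGet? (a :: b :: rest) 0 = some a := by
      simp [PySem.List.pyGet?, PySem.List.pyIdx?, hnn]
    have h2 : PySem.List.pyGet? (a :: b :: rest) 1 = some b := by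
      simp [PySem.List.pyGet?, PySem.List.pyIdx?]
    simp [h1, h2]

theorem find_temporal_pair_py_spec : Claim_equal_find_temporal_pair_py := by
  intro columns _hdom hpre
  unfold Spec_find_temporal_pair_py
  have hs := pvFoldB_s columns hpre none none none []
  have he1 := pvFoldB_e1 columns hpre none none none []
  have he2 := pvFoldB_e2 columns hpre none none none [] (fun _ => rfl)
  have htt := pvFoldB_t columns hpre none none none [] (by simp)
  rcases hfold : columns.foldl pvStepB (none, none, none, []) with ⟨s, e1, e2, t⟩
  rw [hfold] at hs he1 he2 htt
  simp only [pvSP, pvEP, List.nil_append, Nat.sub_zero, List.length_nil] at hs he1 he2 htt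
  rw [find_temporal_pair_py, find_temporal_pair_py_alt, hfold]
  simp only []
  cases hS : pvFindByPatternsA columns ["admission", "start", "from", "begin", "checkin"] [] with
  | none =>
    rw [hS] at hs
    simp only [hs, pvTruthy, Option.isSome_none, Bool.false_and, Bool.false_eq_true, if_false,
      Option.isNone_none, Bool.true_or, if_true]
    rw [htt]
    exact pvTemporal_agree _
  | some sn =>
    rw [hS] at hs
    have hsn : (sn == "") = false :=
      pvFind_ne_empty columns _ [] sn hS (by decide)
    simp only [hsn, Bool.false_eq_true, if_false]
    cases hE1 : pvFindByPatternsA columns ["discharge", "end", "to", "stop", "checkout"] [] with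
    | none =>
      rw [hE1] at he1 he2
      have hEA := pvFind_mono_none columns _ [sn] hE1
      rw [hEA]
      simp only [hs, he1, pvTruthy, hsn, Bool.not_false, Bool.and_false, Bool.false_eq_true,
        if_false, Option.isSome_some, Option.isSome_none, Option.isNone_some, beq_iff_eq,
        Bool.false_or, Bool.and_true]
      rw [htt]
      exact pvTemporal_agree _
    | some n =>
      rw [hE1] at he1 he2
      by_cases hnn : n = sn
      · subst hnn
        have hEA : pvFindByPatternsA columns ["discharge", "end", "to", "stop", "checkout"] [n] = e2 := by
          rw [he2]
        rw [hEA]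
        have hendc : (if s.isNone || !(e1 == s) then e1 else e2) = e2 := by
          simp [hs, he1]
        rw [hendc]
        cases e2 with
        | none =>
          simp only [pvTruthy, Bool.and_false, Bool.false_eq_true, if_false, hs,
            Option.isSome_some, Option.isSome_none]
          rw [htt]
          exact pvTemporal_agree _
        | some v =>
          have hv : (v == "") = false := pvFind_ne_empty columns _ [n] v hEA (by decide)
          simp [pvTruthy, hsn, hv, hs]
      · have hEA := pvFind_first_not_blocked columns _ n sn hE1 hnn
        rw [hEA]
        have hn : (n == "") = false := pvFind_ne_empty columns _ [] n hE1 (by decide)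
        have hendc : (if s.isNone || !(e1 == s) then e1 else e2) = some n := by
          simp [hs, he1, hnn]
        rw [hendc]
        simp [pvTruthy, hsn, hn, hs, he1]
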